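-- pv_equiv track=rewrite | github.com/Cybergenik/AoC | 2024/day19/part1.py | possible_designs
-- ===== SOURCE A (Python) =====
-- from functools import cache
--
-- def possible_designs(patterns, designs):
--     @cache
--     def possible(des):
--         if len(des) == 0:
--             return True
--         for i in range(1, len(des)+1):
--             subd = des[:i]
--             if subd in patterns and possible(des[i:]):
--                 return True
--         return False
--
--     total = 0
--     for d in designs:
--         if possible(d):
--             total += 1
--     return total
-- ===== SOURCE B (Python) =====
-- def possible_designs(patterns, designs):
--     def buildable(d):
--         n = len(d)
--         dp = [False] * (n + 1)   # dp[i]: suffix d[i:] can be built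
--         dp[n] = True
--         for i in range(n - 1, -1, -1):
--             for k in range(i + 1, n + 1):
--                 if dp[k] and d[i:k] in patterns:
--                     dp[i] = True
--                     break
--         return dp[0]
--     return sum(1 for d in designs if buildable(d))
-- ===== Notes on version B (the rewrite author's own statement) =====
-- stated objective: alternative
-- what changed: Replaces the memoized top-down recursion over suffixes with an explicit bottom-up boolean DP table filled backwards per design; same membership test against the pattern list.
import Mathlib
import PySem

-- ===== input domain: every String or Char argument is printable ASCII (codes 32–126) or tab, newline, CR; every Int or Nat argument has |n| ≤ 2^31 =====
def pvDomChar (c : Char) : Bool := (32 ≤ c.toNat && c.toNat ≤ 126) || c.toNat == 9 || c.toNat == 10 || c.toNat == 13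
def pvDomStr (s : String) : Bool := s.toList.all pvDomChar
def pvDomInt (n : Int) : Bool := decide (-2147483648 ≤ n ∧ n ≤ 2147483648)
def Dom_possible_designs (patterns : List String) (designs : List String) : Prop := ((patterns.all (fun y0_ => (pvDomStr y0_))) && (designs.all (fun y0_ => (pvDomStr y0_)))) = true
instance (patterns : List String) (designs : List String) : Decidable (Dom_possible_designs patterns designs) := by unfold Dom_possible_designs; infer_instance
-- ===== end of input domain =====

-- B replaces A's memoized top-down recursion with an explicit bottom-up DP table per design
-- (alternative decomposition, same cost; return values proved equal on all inputs).

-- ===== PORT A =====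
-- possible(des): the inner recursive function of A (memoization does not change the value).
-- des[:i] / des[i:] with 1 ≤ i ≤ len(des) are exactly take/drop; 'subd in patterns' is list membership by string equality.
def aPossible (patterns : List String) (des : List Char) : Bool :=
  if h : des.isEmpty then true
  else
    (List.range des.length).any fun j =>
      patterns.contains (String.ofList (des.take (j+1))) && aPossible patterns (des.drop (j+1))
termination_by des.length
decreasing_by
  have hne : des ≠ [] := by simpa [List.isEmpty_iff] using h
  have : 0 < des.length := List.length_pos_of_ne_nil hne
  simp [List.length_drop]; omega

def possible_designs (patterns : List String) (designs : List String) : Int :=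
  designs.foldl (fun total d => if aPossible patterns d.toList then total + 1 else total) 0

-- ===== PORT B =====
-- bDp patterns d m = [dp[n-m], …, dp[n]] : the dp array suffix after B's outer loop has run
-- down to index i = n-m (prepending = writing dp[i]); d[i:k] with i ≤ k ≤ n is (d.drop i).take (k-i).
def bDp (patterns : List String) (d : List Char) : Nat → List Bool
  | 0 => [true]
  | m+1 =>
    let rest := bDp patterns d m
    let i := d.length - (m+1)
    ((List.range rest.length).any fun t =>
        rest.getD t false && patterns.contains (String.ofList ((d.drop i).take (t+1)))) :: rest

def possible_designs_alt (patterns : List String) (designs : List String) : Int :=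
  designs.foldl
    (fun total d =>
      if (bDp patterns d.toList d.toList.length).getD 0 false then total + 1 else total) 0

-- ===== PRECONDITION & SPEC =====
def Spec_possible_designs (patterns : List String) (designs : List String) (out : Int) : Prop := out = possible_designs_alt patterns designs
instance (patterns : List String) (designs : List String) (out : Int) : Decidable (Spec_possible_designs patterns designs out) := by unfold Spec_possible_designs; infer_instance

-- ===== CLAIM (what is proved, stated in full; the proofs are below) =====
def Claim_equal_possible_designs : Prop := ∀ (patterns : List String) (designs : List String), Dom_possible_designs patterns designs → Spec_possible_designs patterns designs (possible_designs patterns designs)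

-- ===== LEMMAS AND PROOFS =====

theorem any_congr' {α : Type} (l : List α) (f g : α → Bool)
    (h : ∀ x ∈ l, f x = g x) : l.any f = l.any g := by
  induction l with
  | nil => rfl
  | cons a t ih => simp only [List.any_cons, h a (by simp), ih (fun x hx => h x (by simp [hx]))]

theorem aPossible_nil (patterns : List String) : aPossible patterns [] = true := by
  rw [aPossible]; rfl

theorem aPossible_cons (patterns : List String) (des : List Char) (h : des ≠ []) :
    aPossible patterns des =
      (List.range des.length).any fun j =>
        patterns.contains (String.ofList (des.take (j+1))) && aPossible patterns (des.drop (j+1)) := by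
  rw [aPossible]; simp [List.isEmpty_iff, h]

-- the dp invariant: each entry of B's table is A's possible on the corresponding suffix
theorem bDp_spec (patterns : List String) (d : List Char) (m : Nat) (hm : m ≤ d.length) :
    bDp patterns d m =
      (List.range (m+1)).map (fun t => aPossible patterns (d.drop (d.length - m + t))) := by
  induction m with
  | zero =>
    simp [bDp, List.range_succ, List.drop_length, aPossible_nil]
  | succ m ih =>
    have hm' : m ≤ d.length := Nat.le_of_succ_le hm
    have ihr := ih hm'
    set n := d.length with hn
    have hlen : (bDp patterns d m).length = m + 1 := by rw [ihr]; simp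
    have hgetD : ∀ t < m + 1,
        (bDp patterns d m).getD t false = aPossible patterns (d.drop (n - m + t)) := by
      intro t ht
      rw [ihr]
      simp [List.getD, ht]
    -- the new head equals possible on the suffix starting at i = n-(m+1)
    have hne : d.drop (n - (m+1)) ≠ [] := by
      have : (d.drop (n - (m+1))).length = m + 1 := by simp [List.length_drop]; omega
      intro hcon; rw [hcon] at this; simp at this
    have hlen2 : (d.drop (n - (m+1))).length = m + 1 := by simp [List.length_drop]; omega
    have hhead :
        ((List.range (bDp patterns d m).length).any fun t =>
            (bDp patterns d m).getD t false &&
              patterns.contains (String.ofList ((d.drop (n - (m+1))).take (t+1)))) =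
          aPossible patterns (d.drop (n - (m+1))) := by
      rw [aPossible_cons patterns _ hne, hlen2, hlen]
      apply any_congr'
      intro t ht
      have ht' : t < m + 1 := by simpa using ht
      rw [hgetD t ht']
      have hdrop : (d.drop (n - (m+1))).drop (t+1) = d.drop (n - m + t) := by
        rw [List.drop_drop]
        congr 1
        omega
      rw [hdrop, Bool.and_comm]
    show (((List.range (bDp patterns d m).length).any fun t =>
        (bDp patterns d m).getD t false &&
          patterns.contains (String.ofList ((d.drop (n - (m+1))).take (t+1)))) :: bDp patterns d m) = _
    rw [hhead, ihr]
    have hr : List.range (m+1+1) = 0 :: (List.range (m+1)).map Nat.succ :=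
      List.range_succ_eq_map
    rw [hr, List.map_cons, List.map_map]
    congr 1
    apply List.map_congr_left
    intro a _
    simp only [Function.comp_apply]
    have harith : n - m + a = n - (m+1) + (a+1) := by omega
    rw [harith]

theorem per_design (patterns : List String) (d : List Char) :
    (bDp patterns d d.length).getD 0 false = aPossible patterns d := by
  rw [bDp_spec patterns d d.length (le_refl _)]
  simp [List.getD]

-- ===== VERDICT (by name: the statement is the Claim_ definition above) =====
theorem possible_designs_spec : Claim_equal_possible_designs := by
  intro patterns designs _
  unfold Spec_possible_designs possible_designs possible_designs_alt
  have hfun : (fun (total : Int) (d : String) =>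
      if aPossible patterns d.toList then total + 1 else total) =
      (fun (total : Int) (d : String) =>
        if (bDp patterns d.toList d.toList.length).getD 0 false then total + 1 else total) := by
    funext total d
    rw [per_design]
  rw [hfun]
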